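-- pv_equiv track=rewrite | github.com/ChongjinChua/ECE364-Software-Engineering-Tools | Prelab03/moreBasics.py | getFormattedSSN
-- ===== SOURCE A (Python) =====
-- def getFormattedSSN(n):
--     ssn_format = [3,2,4]
--     n = str(n)[::-1]
--     count = 0
--     my_string = ""
--     if(len(n) < 9):
--         for item in range(9-len(n)):
--             n += "0"
--         n += n
--     n = n[::-1]
--     for I in ssn_format:
--         I += count
--         my_string += n[count:I]
--         count = I
--         my_string += "-"
--
--     return my_string.rstrip("-")
-- ===== SOURCE B (Python) =====
-- def getFormattedSSN(n):
--     out = []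
--     for i, ch in enumerate(str(n)[:9].rjust(9, "0")):
--         if i in (3, 5):
--             out.append("-")
--         out.append(ch)
--     return "".join(out)
-- ===== Notes on version B (the rewrite author's own statement) =====
-- stated objective: simpler
-- what changed: B makes a single streaming pass over the first nine characters of str(n) left-padded with '0' (rjust), emitting a dash before the fourth and sixth emitted characters, instead of A's double reversal, dead string doubling, accumulator loop over group widths [3,2,4] with slicing, and rstrip('-').
import Mathlib
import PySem

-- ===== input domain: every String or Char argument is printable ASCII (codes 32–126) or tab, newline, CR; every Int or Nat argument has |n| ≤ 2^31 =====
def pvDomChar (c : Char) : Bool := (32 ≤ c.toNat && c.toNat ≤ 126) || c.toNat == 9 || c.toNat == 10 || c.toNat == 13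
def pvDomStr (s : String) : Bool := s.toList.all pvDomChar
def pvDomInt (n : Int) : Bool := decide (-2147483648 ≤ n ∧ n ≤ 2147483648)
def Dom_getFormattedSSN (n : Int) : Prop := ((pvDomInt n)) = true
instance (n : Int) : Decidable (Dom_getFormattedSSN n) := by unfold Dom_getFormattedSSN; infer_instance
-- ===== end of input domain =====

-- B replaces A's double reversal, dead string doubling, group-width loop with slicing
-- and rstrip('-') by one streaming enumerate pass over the left-padded first 9
-- characters, inserting '-' before the fourth and sixth characters (objective: simpler; same cost).

-- hand port of Python's my_string.rstrip("-"): drop trailing '-' characters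
-- (exact: rstrip(chars) removes the longest trailing run of characters from chars)
def pvRstripDash (cs : List Char) : List Char :=
  (cs.reverse.dropWhile (fun c => c == '-')).reverse

-- ===== PORT A =====
def getFormattedSSN (n : Int) : String :=
  -- n = str(n)[::-1]
  let s1 := (PySem.Int.toChars n).reverse
  -- if len(n) < 9: for item in range(9-len(n)): n += "0";  n += n
  let s2 := if s1.length < 9 then
      (PySem.List.pyRange 0 (9 - (s1.length : Int)) 1).foldl
        (fun acc (_ : Int) => acc ++ ['0']) s1
    else s1
  let s3 := if s1.length < 9 then s2 ++ s2 else s2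
  -- n = n[::-1]
  let t := s3.reverse
  -- for I in [3,2,4]: I += count; my_string += n[count:I]; count = I; my_string += "-"
  let r := [(3 : Int), 2, 4].foldl
    (fun (st : List Char × Int) I =>
      let I' := I + st.2
      (st.1 ++ PySem.List.slice t (some st.2) (some I') ++ ['-'], I'))
    ([], 0)
  -- return my_string.rstrip("-")
  String.ofList (pvRstripDash r.1)

-- ===== PORT B =====
def getFormattedSSN_alt (n : Int) : String :=
  -- str(n)[:9]
  let s := PySem.List.slice (PySem.Int.toChars n) none (some 9)
  -- .rjust(9, "0"): ported by hand (exact: rjust left-pads with the fill char to the width)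
  let p := if s.length < 9 then List.replicate (9 - s.length) '0' ++ s else s
  -- for i, ch in enumerate(p): if i in (3,5): out.append("-"); out.append(ch)
  String.ofList ((PySem.List.enumerate p).foldl
    (fun acc (q : Int × Char) =>
      (if q.1 == 3 || q.1 == 5 then acc ++ ['-'] else acc) ++ [q.2]) [])

-- ===== PRECONDITION & SPEC =====
def Spec_getFormattedSSN (n : Int) (out : String) : Prop := out = getFormattedSSN_alt n
instance (n : Int) (out : String) : Decidable (Spec_getFormattedSSN n out) := by unfold Spec_getFormattedSSN; infer_instance

-- ===== CLAIM (what is proved, stated in full; the proofs are below) =====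
def Claim_equal_getFormattedSSN : Prop := ∀ (n : Int), Dom_getFormattedSSN n → Spec_getFormattedSSN n (getFormattedSSN n)

-- ===== LEMMAS AND PROOFS =====

-- padding loop of A: appending '0' once per range element is appending a replicate
lemma pvFoldl_append_zero (l : List Int) (acc : List Char) :
    l.foldl (fun a (_ : Int) => a ++ ['0']) acc = acc ++ List.replicate l.length '0' := by
  induction l generalizing acc with
  | nil => simp
  | cons x xs ih => rw [List.foldl_cons, ih]; simp [List.replicate_succ]

-- slices that end inside p only see p, whatever follows p
lemma pvSlice_prefix (p q : List Char) (a b : Int) (ha : 0 ≤ a) (hb : 0 ≤ b)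
    (hal : a.toNat ≤ p.length) (hbl : b.toNat ≤ p.length) :
    PySem.List.slice (p ++ q) (some a) (some b) = PySem.List.slice p (some a) (some b) := by
  rw [PySem.List.slice_toNat _ ha hb, PySem.List.slice_toNat _ ha hb,
    List.drop_append_of_le_length hal,
    List.take_append_of_le_length (by simp [List.length_drop]; omega)]

-- A's body, for an arbitrary string s, equals the padded 3-2-4 slice form
lemma pvCore (s : List Char) :
    String.ofList (pvRstripDash
      (let s1 := s.reverse
       let s2 := if s1.length < 9 then
          (PySem.List.pyRange 0 (9 - (s1.length : Int)) 1).foldl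
            (fun acc (_ : Int) => acc ++ ['0']) s1
        else s1
       let s3 := if s1.length < 9 then s2 ++ s2 else s2
       let t := s3.reverse
       ([(3 : Int), 2, 4].foldl
        (fun (st : List Char × Int) I =>
          let I' := I + st.2
          (st.1 ++ PySem.List.slice t (some st.2) (some I') ++ ['-'], I'))
        ([], 0)).1)) =
    String.ofList (pvRstripDash
      (let p := if s.length < 9 then List.replicate (9 - s.length) '0' ++ s else s
       (PySem.List.slice p (some 0) (some 3) ++ ['-'] ++
        PySem.List.slice p (some 3) (some 5) ++ ['-'] ++
        PySem.List.slice p (some 5) (some 9) ++ ['-']))) := by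
  have e1 : (3 : Int) + 0 = 3 := by norm_num
  have e2 : (2 : Int) + 3 = 5 := by norm_num
  have e3 : (4 : Int) + 5 = 9 := by norm_num
  by_cases h : s.length < 9
  · have hlen : (List.replicate (9 - s.length) '0' ++ s).length = 9 := by
      simp [List.length_replicate]; omega
    have hrange : (PySem.List.pyRange 0 (9 - (s.length : Int)) 1).length = 9 - s.length := by
      rw [PySem.List.length_pyRange_one]; omega
    simp only [List.length_reverse, h, if_pos, pvFoldl_append_zero, hrange,
      List.reverse_append, List.reverse_replicate, List.reverse_reverse, List.foldl,
      e1, e2, e3]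
    rw [pvSlice_prefix _ _ 0 3 (by norm_num) (by norm_num) (by omega) (by omega),
        pvSlice_prefix _ _ 3 5 (by norm_num) (by norm_num) (by omega) (by omega),
        pvSlice_prefix _ _ 5 9 (by norm_num) (by norm_num) (by omega) (by omega)]
    simp [List.append_assoc]
  · simp only [List.length_reverse, h, List.foldl, List.reverse_reverse, if_false,
      e1, e2, e3]
    simp [List.append_assoc]

-- decimal digit characters are never '-'
lemma pvDigitChar_ne_dash (m : Nat) : Nat.digitChar m ≠ '-' := by
  by_cases h : m < 16
  · interval_cases m <;> decide
  · have h0 : m ≠ 0 := by omega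
    have h1 : m ≠ 1 := by omega
    have h2 : m ≠ 2 := by omega
    have h3 : m ≠ 3 := by omega
    have h4 : m ≠ 4 := by omega
    have h5 : m ≠ 5 := by omega
    have h6 : m ≠ 6 := by omega
    have h7 : m ≠ 7 := by omega
    have h8 : m ≠ 8 := by omega
    have h9 : m ≠ 9 := by omega
    have h10 : m ≠ 10 := by omega
    have h11 : m ≠ 11 := by omega
    have h12 : m ≠ 12 := by omega
    have h13 : m ≠ 13 := by omega
    have h14 : m ≠ 14 := by omega
    have h15 : m ≠ 15 := by omega
    simp [Nat.digitChar, h0, h1, h2, h3, h4, h5, h6, h7, h8, h9, h10, h11, h12, h13, h14, h15]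

lemma pvToDigitsCore_not_dash (f : Nat) : ∀ (n : Nat) (l : List Char),
    '-' ∉ l → '-' ∉ Nat.toDigitsCore 10 f n l := by
  induction f with
  | zero => intro n l hl; simpa [Nat.toDigitsCore] using hl
  | succ f ih =>
    intro n l hl
    simp only [Nat.toDigitsCore]
    split
    · intro hmem
      rcases List.mem_cons.mp hmem with h | h
      · exact pvDigitChar_ne_dash _ h.symm
      · exact hl h
    · refine ih _ _ ?_
      intro hmem
      rcases List.mem_cons.mp hmem with h | h
      · exact pvDigitChar_ne_dash _ h.symm
      · exact hl h

lemma pvToDigitsCore_len (f : Nat) : ∀ (n : Nat) (l : List Char),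
    l.length ≤ (Nat.toDigitsCore 10 f n l).length := by
  induction f with
  | zero => intro n l; simp [Nat.toDigitsCore]
  | succ f ih =>
    intro n l
    simp only [Nat.toDigitsCore]
    split
    · simp
    · exact le_trans (by simp) (ih (n / 10) (Nat.digitChar (n % 10) :: l))

lemma pvToDigits_ne_nil (m : Nat) : Nat.toDigits 10 m ≠ [] := by
  unfold Nat.toDigits
  simp only [Nat.toDigitsCore]
  split
  · simp
  · intro h
    have := pvToDigitsCore_len m (m / 10) [Nat.digitChar (m % 10)]
    rw [h] at this
    simp at this

lemma pvToChars_ne_nil (n : Int) : PySem.Int.toChars n ≠ [] := by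
  unfold PySem.Int.toChars
  split
  · simp
  · exact pvToDigits_ne_nil _

lemma pvToChars_len_neg (n : Int) (h : n < 0) : 2 ≤ (PySem.Int.toChars n).length := by
  unfold PySem.Int.toChars
  rw [if_pos h]
  have := pvToDigits_ne_nil n.natAbs
  have : 1 ≤ (Nat.toDigits 10 n.natAbs).length := by
    cases hd : Nat.toDigits 10 n.natAbs with
    | nil => exact absurd hd (pvToDigits_ne_nil _)
    | cons a l => simp
  simp; omega

-- every character of str(n) except a possible leading sign is a digit, never '-'
lemma pvToChars_getD (n : Int) (i : Nat) (h : 1 ≤ i ∨ 0 ≤ n) :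
    (PySem.Int.toChars n).getD i '0' ≠ '-' := by
  have hdig : ∀ (m : Nat) (j : Nat), (Nat.toDigits 10 m).getD j '0' ≠ '-' := by
    intro m j
    by_cases hj : j < (Nat.toDigits 10 m).length
    · rw [List.getD_eq_getElem _ _ hj]
      intro hc
      exact pvToDigitsCore_not_dash _ m [] (by simp) (hc ▸ List.getElem_mem hj)
    · rw [List.getD_eq_default _ _ (by omega)]; decide
  unfold PySem.Int.toChars
  split
  · rename_i hn
    have hi : 1 ≤ i := by rcases h with h | h; exact h; omega
    obtain ⟨j, rfl⟩ : ∃ j, i = j + 1 := ⟨i - 1, by omega⟩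
    simpa using hdig n.natAbs j
  · exact hdig n.toNat i

-- core: for any 9-character block p (whose last char is not '-') followed by r,
-- the 3-2-4 slice-and-rstrip form equals B's enumerate pass over p
lemma pvMain (p r : List Char) (hp : p.length = 9) (h8 : p.getD 8 '0' ≠ '-') :
    String.ofList (pvRstripDash
      (PySem.List.slice (p ++ r) (some 0) (some 3) ++ ['-'] ++
       PySem.List.slice (p ++ r) (some 3) (some 5) ++ ['-'] ++
       PySem.List.slice (p ++ r) (some 5) (some 9) ++ ['-'])) =
    String.ofList ((PySem.List.enumerate p).foldl
      (fun acc (q : Int × Char) =>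
        (if q.1 == 3 || q.1 == 5 then acc ++ ['-'] else acc) ++ [q.2]) []) := by
  rcases p with _ | ⟨a0, p⟩; · simp at hp
  rcases p with _ | ⟨a1, p⟩; · simp at hp
  rcases p with _ | ⟨a2, p⟩; · simp at hp
  rcases p with _ | ⟨a3, p⟩; · simp at hp
  rcases p with _ | ⟨a4, p⟩; · simp at hp
  rcases p with _ | ⟨a5, p⟩; · simp at hp
  rcases p with _ | ⟨a6, p⟩; · simp at hp
  rcases p with _ | ⟨a7, p⟩; · simp at hp
  rcases p with _ | ⟨a8, p⟩; · simp at hp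
  rcases p with _ | ⟨a9, p⟩
  swap
  · simp at hp
  have h8' : (a8 == '-') = false := by
    simpa using h8
  rw [PySem.List.slice_toNat _ (by norm_num) (by norm_num),
      PySem.List.slice_toNat _ (by norm_num) (by norm_num),
      PySem.List.slice_toNat _ (by norm_num) (by norm_num)]
  simp [pvRstripDash, PySem.List.enumerate, List.dropWhile, h8']

-- ===== VERDICT (by name: the statement is the Claim_ definition above) =====
theorem getFormattedSSN_spec : Claim_equal_getFormattedSSN := by
  intro n _
  show getFormattedSSN n = getFormattedSSN_alt n
  simp only [getFormattedSSN, getFormattedSSN_alt]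
  rw [pvCore (PySem.Int.toChars n)]
  set s := PySem.Int.toChars n with hs
  by_cases h : s.length < 9
  · -- str(n)[:9] = s; padded block has length 9 and is followed by nothing
    have hslice : PySem.List.slice s none (some 9) = s := by
      rw [PySem.List.slice_to _ (by norm_num)]
      exact List.take_of_length_le (by omega)
    have hne : s ≠ [] := pvToChars_ne_nil n
    have hlen1 : 1 ≤ s.length := List.length_pos_of_ne_nil hne
    have hplen : (List.replicate (9 - s.length) '0' ++ s).length = 9 := by
      simp; omega
    have h8 : (List.replicate (9 - s.length) '0' ++ s).getD 8 '0' ≠ '-' := by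
      rw [List.getD_append_right _ _ _ _ (by simp; omega)]
      simp only [List.length_replicate]
      have hidx : 8 - (9 - s.length) = s.length - 1 := by omega
      rw [hidx]
      apply pvToChars_getD
      by_cases hn : 0 ≤ n
      · right; exact hn
      · left
        have := pvToChars_len_neg n (by omega)
        rw [← hs] at this; omega
    have := pvMain (List.replicate (9 - s.length) '0' ++ s) [] hplen h8
    simp only [List.append_nil] at this
    simp only [h, if_pos, hslice]
    exact this
  · -- str(n) already has ≥ 9 characters: the block is its first 9 characters
    have h9 : 9 ≤ s.length := by omega
    have hslice : PySem.List.slice s none (some 9) = s.take 9 := by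
      rw [PySem.List.slice_to _ (by norm_num)]; rfl
    have htl : (s.take 9).length = 9 := by
      simp [List.length_take]; omega
    have h8 : (s.take 9).getD 8 '0' ≠ '-' := by
      rw [List.getD_eq_getElem _ _ (by omega), List.getElem_take]
      have := pvToChars_getD n 8 (Or.inl (by norm_num))
      rw [← hs, List.getD_eq_getElem _ _ (by omega)] at this
      exact this
    have hmain := pvMain (s.take 9) (s.drop 9) htl h8
    rw [List.take_append_drop] at hmain
    have hnp : ¬ (s.take 9).length < 9 := by omega
    simp only [h, hslice, hnp, if_false]
    exact hmain
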